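-- pv_equiv track=rewrite | github.com/0xZenithdev/AI-project | src/manage_ml_dataset.py | choose_sketch_group_key
-- ===== SOURCE A (Python) =====
-- def choose_sketch_group_key(sketch_stem: str, image_stems_sorted: list[str], image_stem_set: set[str]) -> str | None:
--     sketch_key = sketch_stem.lower()
--     if sketch_key in image_stem_set:
--         return sketch_key
--
--     for image_stem in image_stems_sorted:
--         if not sketch_key.startswith(image_stem):
--             continue
--         remainder = sketch_key[len(image_stem) :]
--         if not remainder:
--             return image_stem
--         if remainder[0] in "_-. ":
--             return image_stem
--
--     return None
-- ===== SOURCE B (Python) =====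
-- def choose_sketch_group_key(sketch_stem: str, image_stems_sorted: list[str], image_stem_set: set[str]) -> str | None:
--     sketch_key = sketch_stem.lower()
--     if sketch_key in image_stem_set:
--         return sketch_key
--     n = len(sketch_key)
--     valid = {sketch_key[:L] for L in range(n + 1) if L == n or sketch_key[L] in "_-. "}
--     return next((stem for stem in image_stems_sorted if stem in valid), None)
-- ===== Notes on version B (the rewrite author's own statement) =====
-- stated objective: faster
-- what changed: Instead of scanning the list and testing startswith plus boundary character per element (O(n*L)), B precomputes the set of valid separator-bounded prefixes of the lowered sketch stem once and returns the first list element found in that set (O(L^2 + n) with O(1)-ish membership).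
import Mathlib
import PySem

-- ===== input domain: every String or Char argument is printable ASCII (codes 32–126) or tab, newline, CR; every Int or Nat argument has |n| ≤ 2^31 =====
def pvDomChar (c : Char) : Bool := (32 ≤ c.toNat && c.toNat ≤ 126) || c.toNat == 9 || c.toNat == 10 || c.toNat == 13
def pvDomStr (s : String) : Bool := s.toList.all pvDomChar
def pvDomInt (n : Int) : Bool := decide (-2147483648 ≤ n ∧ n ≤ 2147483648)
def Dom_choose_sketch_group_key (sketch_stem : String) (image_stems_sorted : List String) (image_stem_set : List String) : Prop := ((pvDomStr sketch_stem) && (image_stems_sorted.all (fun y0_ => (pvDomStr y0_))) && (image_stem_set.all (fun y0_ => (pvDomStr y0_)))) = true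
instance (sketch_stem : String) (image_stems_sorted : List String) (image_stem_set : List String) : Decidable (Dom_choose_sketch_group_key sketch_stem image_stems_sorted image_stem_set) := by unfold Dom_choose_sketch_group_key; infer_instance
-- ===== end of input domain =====

-- B replaces A's per-element startswith/boundary test with a precomputed set of valid prefixes of the
-- lowered sketch stem, then takes the first list element contained in it (objective: faster).

-- ===== PORT A =====
-- the boundary characters "_-. " (shared literal)
def pvSeps : List Char := ['_', '-', '.', ' ']

-- A's for-loop over image_stems_sorted
def pvLoopA (key : String) : List String → Option String
  | [] => none
  | stem :: rest =>
    if PySem.Str.startswith key stem = false then pvLoopA key rest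
    -- remainder := key[len(stem):] is PySem.Str.slice key (some (len stem)) none (inlined)
    else if PySem.Str.len (PySem.Str.slice key (some (PySem.Str.len stem)) none) = 0 then some stem
    else
      match PySem.Str.pyGet? (PySem.Str.slice key (some (PySem.Str.len stem)) none) 0 with
      | some c => if PySem.Chars.isIn [c] pvSeps then some stem else pvLoopA key rest
      | none => pvLoopA key rest   -- unreachable: the remainder is nonempty here

def choose_sketch_group_key (sketch_stem : String) (image_stems_sorted : List String) (image_stem_set : List String) : Option String :=
  let sketch_key := PySem.Str.lower sketch_stem
  if PySem.Set.contains image_stem_set sketch_key then some sketch_key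
  else pvLoopA sketch_key image_stems_sorted

-- ===== PORT B =====
-- the set comprehension {sketch_key[:L] for L in range(n+1) if L == n or sketch_key[L] in "_-. "}
def pvValidSet (key : String) : PySem.Set String :=
  let n : Int := PySem.Str.len key
  PySem.Set.ofList
    (((PySem.List.pyRange 0 (n + 1) 1).filter
        (fun L => L == n || (PySem.Str.pyGet? key L).elim false (fun c => PySem.Chars.isIn [c] pvSeps))).map
      (fun L => PySem.Str.slice key none (some L)))

def choose_sketch_group_key_alt (sketch_stem : String) (image_stems_sorted : List String) (image_stem_set : List String) : Option String :=
  let sketch_key := PySem.Str.lower sketch_stem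
  if PySem.Set.contains image_stem_set sketch_key then some sketch_key
  else
    let valid := pvValidSet sketch_key
    image_stems_sorted.find? (fun stem => PySem.Set.contains valid stem)

-- ===== PRECONDITION & SPEC =====
def Spec_choose_sketch_group_key (sketch_stem : String) (image_stems_sorted : List String) (image_stem_set : List String) (out : Option String) : Prop := out = choose_sketch_group_key_alt sketch_stem image_stems_sorted image_stem_set
instance (sketch_stem : String) (image_stems_sorted : List String) (image_stem_set : List String) (out : Option String) : Decidable (Spec_choose_sketch_group_key sketch_stem image_stems_sorted image_stem_set out) := by unfold Spec_choose_sketch_group_key; infer_instance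

-- ===== CLAIM (what is proved, stated in full; the proofs are below) =====
def Claim_equal_choose_sketch_group_key : Prop := ∀ (sketch_stem : String) (image_stems_sorted : List String) (image_stem_set : List String), Dom_choose_sketch_group_key sketch_stem image_stems_sorted image_stem_set → Spec_choose_sketch_group_key sketch_stem image_stems_sorted image_stem_set (choose_sketch_group_key sketch_stem image_stems_sorted image_stem_set)

-- ===== LEMMAS AND PROOFS =====

-- A's acceptance test for one list element, as a boolean predicate
def pvValidA (key stem : String) : Bool :=
  PySem.Str.startswith key stem &&
    (PySem.Str.len (PySem.Str.slice key (some (PySem.Str.len stem)) none) == 0 ||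
      (PySem.Str.pyGet? (PySem.Str.slice key (some (PySem.Str.len stem)) none) 0).elim false
        (fun c => PySem.Chars.isIn [c] pvSeps))

-- A's loop is a first-match search with that predicate
theorem pvLoopA_eq_find? (key : String) (xs : List String) :
    pvLoopA key xs = xs.find? (fun stem => pvValidA key stem) := by
  induction xs with
  | nil => rfl
  | cons stem rest ih =>
    rw [pvLoopA]
    cases h1 : PySem.Str.startswith key stem with
    | false =>
      have hv : pvValidA key stem = false := by
        simp only [pvValidA, h1, Bool.false_and]
      simp [hv, ih]
    | true =>
      rw [if_neg (by simp)]
      by_cases h2 : PySem.Str.len (PySem.Str.slice key (some (PySem.Str.len stem)) none) = 0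
      · have hv : pvValidA key stem = true := by
          simp only [pvValidA, h1, h2, Bool.true_and, beq_self_eq_true, Bool.true_or]
        rw [if_pos h2]
        simp [hv]
      · have h2b : (PySem.Str.len (PySem.Str.slice key (some (PySem.Str.len stem)) none) == 0) = false :=
          beq_eq_false_iff_ne.mpr h2
        rw [if_neg h2]
        cases h3 : PySem.Str.pyGet? (PySem.Str.slice key (some (PySem.Str.len stem)) none) 0 with
        | none =>
          have hv : pvValidA key stem = false := by
            simp only [pvValidA, h1, h2b, h3, Bool.true_and, Bool.false_or, Option.elim_none]
          simp [hv, ih]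
        | some c =>
          cases h4 : PySem.Chars.isIn [c] pvSeps with
          | true =>
            have hv : pvValidA key stem = true := by
              simp only [pvValidA, h1, h2b, h3, h4, Bool.true_and, Bool.false_or, Option.elim_some]
            simp [hv, h4]
          | false =>
            have hv : pvValidA key stem = false := by
              simp only [pvValidA, h1, h2b, h3, h4, Bool.true_and, Bool.false_or, Option.elim_some]
            simp [hv, ih, h4]

-- pointwise: A's test is membership in B's precomputed set of valid prefixes
theorem pvValidA_eq (key stem : String) :
    pvValidA key stem = PySem.Set.contains (pvValidSet key) stem := by
  have hget0 : ∀ (xs : List Char), PySem.List.pyGet? xs 0 = xs[0]? := fun xs => by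
    rw [show (0:Int) = ((0:Nat):Int) from rfl, PySem.List.pyGet?_natCast]
  rw [Bool.eq_iff_iff, PySem.Set.contains_iff]
  unfold pvValidSet
  rw [PySem.Set.mem_ofList]
  simp [pvValidA, List.mem_filter, PySem.List.mem_pyRange_one]
  constructor
  · rintro ⟨hpre, hc⟩
    rw [PySem.Chars.startswith_iff] at hpre
    have hle : stem.length ≤ key.length := by
      have := hpre.length_le; simpa using this
    refine ⟨(stem.length : Int), ⟨⟨by positivity, by exact_mod_cast hle⟩, ?_⟩, ?_⟩
    · rcases hc with h | h
      · left; omega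
      · right
        rw [PySem.List.pyGet?_natCast]
        rw [hget0, List.getElem?_drop] at h
        simpa using h
    · apply String.toList_inj.mp
      have hsl : (PySem.Str.slice key none (some (stem.length : Int))).toList
          = key.toList.take stem.length := by
        simp [PySem.List.slice_to _ (by positivity : (0:Int) ≤ ((stem.length : Nat) : Int))]
      rw [hsl]
      have := List.prefix_iff_eq_take.mp hpre
      simpa using this.symm
  · rintro ⟨a, ⟨⟨h0, hle⟩, hc⟩, hs⟩
    have ha : a = ((a.toNat : Nat) : Int) := by omega
    have hmle : a.toNat ≤ key.length := by omega
    have hslice : (PySem.Str.slice key none (some a)).toList = key.toList.take a.toNat := by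
      simp [PySem.List.slice_to _ h0]
    have hstemlist : stem.toList = key.toList.take a.toNat := by
      rw [← hs, hslice]
    have hstemlen : stem.length = a.toNat := by
      have := congrArg List.length hstemlist
      simpa [Nat.min_eq_left hmle] using this
    constructor
    · rw [PySem.Chars.startswith_iff, hstemlist]; exact List.take_prefix _ _
    · rcases hc with h | h
      · left; omega
      · right
        have hlt : a.toNat < key.length := by
          by_contra hge
          have hak : a = (key.length : Int) := by omega
          rw [hak, PySem.List.pyGet?_natCast] at h
          have hnone : key.toList[(key.length : Nat)]? = none :=
            List.getElem?_eq_none (by simp)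
          rw [hnone] at h
          simp at h
        rw [hget0, List.getElem?_drop, hstemlen]
        rw [ha, PySem.List.pyGet?_natCast] at h
        simpa using h

-- ===== VERDICT (by name: the statement is the Claim_ definition above) =====
theorem choose_sketch_group_key_spec : Claim_equal_choose_sketch_group_key := by
  intro s xs st _
  unfold Spec_choose_sketch_group_key
  simp only [choose_sketch_group_key, choose_sketch_group_key_alt]
  by_cases h : PySem.Set.contains st (PySem.Str.lower s) = true
  · rw [if_pos h, if_pos h]
  · rw [if_neg h, if_neg h, pvLoopA_eq_find?,
      show (fun stem => pvValidA (PySem.Str.lower s) stem)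
          = (fun stem => PySem.Set.contains (pvValidSet (PySem.Str.lower s)) stem) from
        funext (fun stem => pvValidA_eq _ stem)]
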